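-- pv_equiv track=rewrite | github.com/Techris93/optifit | backend/app/services/workout_generator.py | _goal_split
-- ===== SOURCE A (Python) =====
-- from typing import Any, Dict, List, Optional
--
-- def _goal_split(goal: str, focus_areas: List[str]) -> List[str]:
--     splits = {
--         "strength": ["legs", "push", "pull", "hinge", "core"],
--         "hypertrophy": ["push", "pull", "legs", "hinge", "core"],
--         "endurance": ["conditioning", "legs", "push", "pull", "core"],
--         "fat_loss": ["conditioning", "legs", "push", "pull", "core"],
--     }
--     order = splits.get(goal, splits["strength"]).copy()
--     focus_map = {
--         "chest": "push",
--         "shoulders": "push",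
--         "triceps": "push",
--         "back": "pull",
--         "biceps": "pull",
--         "legs": "legs",
--         "glutes": "hinge",
--         "core": "core",
--     }
--
--     for focus in reversed(focus_areas):
--         category = focus_map.get(focus)
--         if category and category in order:
--             order.remove(category)
--             order.insert(0, category)
--     return order
-- ===== SOURCE B (Python) =====
-- from typing import List
--
-- def _goal_split(goal: str, focus_areas: List[str]) -> List[str]:
--     splits = {
--         "strength": ["legs", "push", "pull", "hinge", "core"],
--         "hypertrophy": ["push", "pull", "legs", "hinge", "core"],
--         "endurance": ["conditioning", "legs", "push", "pull", "core"],
--         "fat_loss": ["conditioning", "legs", "push", "pull", "core"],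
--     }
--     base = splits.get(goal, splits["strength"])
--     focus_map = {
--         "chest": "push",
--         "shoulders": "push",
--         "triceps": "push",
--         "back": "pull",
--         "biceps": "pull",
--         "legs": "legs",
--         "glutes": "hinge",
--         "core": "core",
--     }
--     prioritized = []
--     for focus in focus_areas:
--         category = focus_map.get(focus)
--         if category and category in base and category not in prioritized:
--             prioritized.append(category)
--     return prioritized + [c for c in base if c not in prioritized]
-- ===== Notes on version B (the rewrite author's own statement) =====
-- stated objective: simpler
-- what changed: Replaces A's reverse-iterating loop that mutates the order list with remove/insert(0) by a single forward pass that builds the prioritized prefix in first-occurrence order and then appends the remaining base-order categories.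
import Mathlib
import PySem

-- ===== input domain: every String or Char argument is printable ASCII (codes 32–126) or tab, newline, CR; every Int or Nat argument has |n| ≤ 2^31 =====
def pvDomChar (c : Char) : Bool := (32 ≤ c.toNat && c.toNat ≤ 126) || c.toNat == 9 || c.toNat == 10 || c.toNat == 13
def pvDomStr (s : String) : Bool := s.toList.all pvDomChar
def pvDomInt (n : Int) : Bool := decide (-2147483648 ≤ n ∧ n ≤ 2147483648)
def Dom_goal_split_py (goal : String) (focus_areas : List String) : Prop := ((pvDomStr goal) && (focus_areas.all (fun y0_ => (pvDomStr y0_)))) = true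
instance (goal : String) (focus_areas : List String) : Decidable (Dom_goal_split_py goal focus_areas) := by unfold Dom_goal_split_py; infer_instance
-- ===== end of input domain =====

-- B replaces A's reverse-iterating remove/insert(0) mutation of `order` by a single forward
-- pass building the prioritized prefix, then appending the untouched remainder of the base
-- order (objective: simpler; neither implementation mutates its arguments).

-- ===== PORT A =====
def pvSplits : PySem.Dict String (List String) :=
  PySem.Dict.ofList
    [("strength", ["legs", "push", "pull", "hinge", "core"]),
     ("hypertrophy", ["push", "pull", "legs", "hinge", "core"]),
     ("endurance", ["conditioning", "legs", "push", "pull", "core"]),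
     ("fat_loss", ["conditioning", "legs", "push", "pull", "core"])]

def pvFocusMap : PySem.Dict String String :=
  PySem.Dict.ofList
    [("chest", "push"), ("shoulders", "push"), ("triceps", "push"),
     ("back", "pull"), ("biceps", "pull"), ("legs", "legs"),
     ("glutes", "hinge"), ("core", "core")]

-- one iteration of A's loop body: `category = focus_map.get(focus); if category and category in order: order.remove(category); order.insert(0, category)`
def pvAStep (order : List String) (focus : String) : List String :=
  match pvFocusMap.get? focus with
  | none => order
  | some category =>
    if category ≠ "" ∧ category ∈ order then
      match PySem.List.remove? order category with
      | some rest => PySem.List.insert rest 0 category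
      | none => order   -- unreachable: guarded by `category in order`
    else order

def goal_split_py (goal : String) (focus_areas : List String) : List String :=
  let order := pvSplits.getD goal ((pvSplits.get? "strength").getD [])
  (focus_areas.reverse).foldl pvAStep order

-- ===== PORT B =====
-- one iteration of B's loop: `if category and category in base and category not in prioritized: prioritized.append(category)`
def pvBStep (base : List String) (acc : List String) (focus : String) : List String :=
  match pvFocusMap.get? focus with
  | none => acc
  | some category =>
    if category ≠ "" ∧ category ∈ base ∧ category ∉ acc then acc ++ [category] else acc

def goal_split_py_alt (goal : String) (focus_areas : List String) : List String :=
  let base := pvSplits.getD goal ((pvSplits.get? "strength").getD [])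
  let prioritized := focus_areas.foldl (pvBStep base) []
  prioritized ++ base.filter (fun c => c ∉ prioritized)

-- ===== PRECONDITION & SPEC =====
def Spec_goal_split_py (goal : String) (focus_areas : List String) (out : List String) : Prop := out = goal_split_py_alt goal focus_areas
instance (goal : String) (focus_areas : List String) (out : List String) : Decidable (Spec_goal_split_py goal focus_areas out) := by unfold Spec_goal_split_py; infer_instance

-- ===== CLAIM (what is proved, stated in full; the proofs are below) =====
def Claim_equal_goal_split_py : Prop := ∀ (goal : String) (focus_areas : List String), Dom_goal_split_py goal focus_areas → Spec_goal_split_py goal focus_areas (goal_split_py goal focus_areas)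

-- ===== LEMMAS AND PROOFS =====

-- the prioritized prefix both loops compute (first-occurrence order of mapped categories)
def pvPrio (base : List String) : List String → List String
  | [] => []
  | f :: rest =>
    match pvFocusMap.get? f with
    | none => pvPrio base rest
    | some c =>
      if c ≠ "" ∧ c ∈ base then c :: (pvPrio base rest).filter (fun x => x ≠ c)
      else pvPrio base rest

theorem pvB_char (l : List String) (base : List String) : ∀ acc,
    l.foldl (pvBStep base) acc = acc ++ (pvPrio base l).filter (fun x => x ∉ acc) := by
  induction l with
  | nil => intro acc; simp [pvPrio]
  | cons f rest ih =>
    intro acc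
    rw [List.foldl_cons]
    simp only [pvPrio, pvBStep]
    cases h : pvFocusMap.get? f with
    | none => exact ih acc
    | some c =>
      dsimp only
      by_cases hc : c ≠ "" ∧ c ∈ base
      · by_cases hacc : c ∈ acc
        · rw [if_neg (by simp [hacc]), if_pos hc, ih acc]
          congr 1
          simp only [List.filter_cons]
          rw [if_neg (by simpa using hacc), List.filter_filter]
          apply List.filter_congr
          intro x hx
          by_cases hxc : x = c
          · subst hxc; simp [hacc]
          · simp [hxc]
        · rw [if_pos ⟨hc.1, hc.2, hacc⟩, if_pos hc, ih (acc ++ [c]), List.append_assoc]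
          congr 1
          simp only [List.filter_cons]
          rw [if_pos (by simpa using hacc), List.filter_filter]
          simp only [List.cons_append, List.nil_append]
          congr 1
          apply List.filter_congr
          intro x hx
          by_cases hxc : x = c
          · subst hxc; simp
          · simp [hxc, List.mem_append]
      · rw [if_neg (by tauto), if_neg hc]
        exact ih acc

theorem pvPrio_subset (base l : List String) : ∀ x ∈ pvPrio base l, x ∈ base := by
  induction l with
  | nil => simp [pvPrio]
  | cons f rest ih =>
    simp only [pvPrio]
    cases h : pvFocusMap.get? f with
    | none => exact ih
    | some c =>
      dsimp only
      split
      · next hc =>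
        intro x hx
        rcases List.mem_cons.mp hx with rfl | hx
        · exact hc.2
        · exact ih x (List.mem_filter.mp hx).1
      · exact ih

theorem pvPrio_nodup (base l : List String) : (pvPrio base l).Nodup := by
  induction l with
  | nil => simp [pvPrio]
  | cons f rest ih =>
    simp only [pvPrio]
    cases h : pvFocusMap.get? f with
    | none => exact ih
    | some c =>
      dsimp only
      split
      · refine List.Nodup.cons ?_ (ih.filter _)
        intro hc
        have := (List.mem_filter.mp hc).2
        simp at this
      · exact ih

theorem pvA_char (l : List String) (base : List String) (hnd : base.Nodup) :
    l.foldr (fun f ord => pvAStep ord f) base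
      = pvPrio base l ++ base.filter (fun x => x ∉ pvPrio base l) := by
  induction l with
  | nil =>
    simp only [List.foldr_nil, pvPrio, List.nil_append]
    rw [List.filter_eq_self.mpr (by intro x hx; simp)]
  | cons f rest ih =>
    rw [List.foldr_cons, ih]
    have hsub := pvPrio_subset base rest
    have hndP := pvPrio_nodup base rest
    have hmemO : ∀ x, x ∈ pvPrio base rest ++ base.filter (fun y => y ∉ pvPrio base rest) ↔ x ∈ base := by
      intro x
      simp only [List.mem_append, List.mem_filter, decide_eq_true_eq]
      constructor
      · rintro (h | ⟨h, _⟩)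
        · exact hsub x h
        · exact h
      · intro h
        by_cases hp : x ∈ pvPrio base rest
        · exact Or.inl hp
        · exact Or.inr ⟨h, by simpa using hp⟩
    cases h : pvFocusMap.get? f with
    | none => simp only [pvAStep, pvPrio, h]
    | some c =>
      simp only [pvAStep, pvPrio, h]
      by_cases hc : c ≠ "" ∧ c ∈ base
      · rw [if_pos (⟨hc.1, (hmemO c).mpr hc.2⟩ :
          c ≠ "" ∧ c ∈ pvPrio base rest ++ base.filter (fun y => y ∉ pvPrio base rest))]
        rw [if_pos hc]
        rw [PySem.List.remove?_eq_some_erase _ _ ((hmemO c).mpr hc.2)]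
        dsimp only
        rw [PySem.List.insert_zero]
        have hfilt2 : base.filter (fun x => x ∉ c :: (pvPrio base rest).filter (fun y => y ≠ c))
            = base.filter (fun x => decide (x ≠ c) && decide (x ∉ pvPrio base rest)) := by
          apply List.filter_congr
          intro x hx
          by_cases hxc : x = c
          · subst hxc; simp
          · simp [hxc]
        by_cases hcp : c ∈ pvPrio base rest
        · rw [List.erase_append_left _ hcp]
          rw [hndP.erase_eq_filter]
          have h2 : base.filter (fun y => y ∉ pvPrio base rest)
              = base.filter (fun x => decide (x ≠ c) && decide (x ∉ pvPrio base rest)) := by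
            apply List.filter_congr
            intro x hx
            by_cases hxc : x = c
            · subst hxc; simp [hcp]
            · simp [hxc]
          rw [h2, hfilt2]
          simp only [List.cons_append, List.cons.injEq, List.append_cancel_right_eq, true_and]
          apply List.filter_congr
          intro x _
          by_cases hx : x = c <;> simp [hx]
        · rw [List.erase_append_right _ (by simpa using hcp)]
          rw [(hnd.filter _).erase_eq_filter, List.filter_filter]
          have hPrf : (pvPrio base rest).filter (fun y => y ≠ c) = pvPrio base rest := by
            apply List.filter_eq_self.mpr
            intro x hx
            simp only [decide_eq_true_eq]
            intro hxc; subst hxc; exact hcp hx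
          rw [hPrf]
          have h3 : base.filter (fun x => decide (x ∉ c :: pvPrio base rest))
              = base.filter (fun a => decide (a ∉ pvPrio base rest) && (a != c)) := by
            apply List.filter_congr
            intro x hx
            by_cases hxc : x = c
            · subst hxc; simp
            · simp [hxc, bne]
          rw [List.cons_append, h3]
          simp only [List.cons.injEq, List.append_cancel_left_eq, true_and]
          apply List.filter_congr
          intro x _
          by_cases hx : x = c <;> by_cases hp : x ∈ pvPrio base rest <;> simp [hx, hp]
      · have hnot : ¬ (c ≠ "" ∧ c ∈ pvPrio base rest ++ base.filter (fun y => y ∉ pvPrio base rest)) := by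
          rw [hmemO c]; exact hc
        rw [if_neg hnot, if_neg hc]

theorem pv_base_nodup (goal : String) :
    (pvSplits.getD goal ((pvSplits.get? "strength").getD [])).Nodup := by
  by_cases h1 : goal = "strength"
  · subst h1; decide
  by_cases h2 : goal = "hypertrophy"
  · subst h2; decide
  by_cases h3 : goal = "endurance"
  · subst h3; decide
  by_cases h4 : goal = "fat_loss"
  · subst h4; decide
  have hnone : pvSplits.get? goal = none := by
    have b1 : ("strength" == goal) = false := beq_eq_false_iff_ne.mpr (Ne.symm h1)
    have b2 : ("hypertrophy" == goal) = false := beq_eq_false_iff_ne.mpr (Ne.symm h2)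
    have b3 : ("endurance" == goal) = false := beq_eq_false_iff_ne.mpr (Ne.symm h3)
    have b4 : ("fat_loss" == goal) = false := beq_eq_false_iff_ne.mpr (Ne.symm h4)
    simp [pvSplits, PySem.Dict.get?, PySem.Dict.ofList, PySem.Dict.update,
      PySem.Dict.insert, PySem.Dict.empty, List.find?, b1, b2, b3, b4]
  rw [PySem.Dict.getD, hnone]
  decide


-- ===== VERDICT (by name: the statement is the Claim_ definition above) =====
theorem goal_split_py_spec : Claim_equal_goal_split_py := by
  intro goal focus_areas _
  unfold Spec_goal_split_py goal_split_py goal_split_py_alt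
  dsimp only
  rw [List.foldl_reverse]
  rw [pvA_char _ _ (pv_base_nodup goal)]
  rw [pvB_char]
  simp
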